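-- pv_equiv track=rewrite | github.com/easonyu0203/110_2_py_program | hw2/p1.py | get_sign_index
-- ===== SOURCE A (Python) =====
-- def get_sign_index(words: list[str]) -> int:
--     for sign in "+-":
--         try:
--             index = words.index(sign)
--             return index
--         except ValueError:
--             continue
--     return -1
-- ===== SOURCE B (Python) =====
-- def get_sign_index(words: list[str]) -> int:
--     first_minus = -1
--     for i, w in enumerate(words):
--         if w == '+':
--             return i
--         if w == '-' and first_minus == -1:
--             first_minus = i
--     return first_minus
-- ===== Notes on version B (the rewrite author's own statement) =====
-- stated objective: simpler
-- what changed: Replaces the two full .index scans (first for '+', then for '-') by one linear pass that returns at the first '+' and remembers the first '-'.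
import Mathlib
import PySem

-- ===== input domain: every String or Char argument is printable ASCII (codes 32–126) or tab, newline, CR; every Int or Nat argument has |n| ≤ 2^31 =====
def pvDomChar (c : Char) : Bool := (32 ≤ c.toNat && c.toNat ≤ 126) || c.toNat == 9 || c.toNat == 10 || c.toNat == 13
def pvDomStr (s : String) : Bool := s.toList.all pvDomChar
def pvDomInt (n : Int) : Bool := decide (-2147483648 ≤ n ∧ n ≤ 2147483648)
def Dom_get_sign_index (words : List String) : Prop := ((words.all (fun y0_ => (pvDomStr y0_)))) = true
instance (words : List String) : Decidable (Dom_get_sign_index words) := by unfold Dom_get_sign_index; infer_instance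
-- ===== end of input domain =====

-- B replaces A's two full `.index` scans by one pass that returns at the first '+'
-- and remembers the first '-' (objective: simpler single traversal).

-- ===== PORT A =====
-- A loops over the two signs "+-", returning words.index(sign) if present
-- (the two-iteration loop is unrolled; ValueError = index? none).
def get_sign_index (words : List String) : Int :=
  match PySem.List.index? words "+" with
  | some i => (i : Int)
  | none =>
    match PySem.List.index? words "-" with
    | some i => (i : Int)
    | none => -1

-- ===== PORT B =====
-- single pass: i = current index, fm = first_minus
def get_sign_index_go (ws : List String) (i fm : Int) : Int :=
  match ws with
  | [] => fm
  | w :: t =>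
    if w = "+" then i
    else get_sign_index_go t (i + 1) (if w = "-" ∧ fm = -1 then i else fm)

def get_sign_index_alt (words : List String) : Int :=
  get_sign_index_go words 0 (-1)

-- ===== PRECONDITION & SPEC =====
def Spec_get_sign_index (words : List String) (out : Int) : Prop := out = get_sign_index_alt words
instance (words : List String) (out : Int) : Decidable (Spec_get_sign_index words out) := by unfold Spec_get_sign_index; infer_instance

-- ===== CLAIM (what is proved, stated in full; the proofs are below) =====
def Claim_equal_get_sign_index : Prop := ∀ (words : List String), Dom_get_sign_index words → Spec_get_sign_index words (get_sign_index words)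

-- ===== LEMMAS AND PROOFS =====

-- characterisation of B's loop in terms of A's two index? searches
theorem get_sign_index_go_char (ws : List String) (i fm : Int) (hi : 0 ≤ i) :
    get_sign_index_go ws i fm =
      match PySem.List.index? ws "+" with
      | some k => i + (k : Int)
      | none =>
        if fm = -1 then
          match PySem.List.index? ws "-" with
          | some k => i + (k : Int)
          | none => -1
        else fm := by
  induction ws generalizing i fm with
  | nil => simp [get_sign_index_go, PySem.List.index?]
  | cons w t ih =>
    by_cases hp : w = "+"
    · subst hp
      rw [PySem.List.index?_cons_self]
      simp [get_sign_index_go]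
    · rw [PySem.List.index?_cons_of_ne t hp]
      by_cases hm : w = "-"
      · subst hm
        by_cases hfm : fm = -1
        · subst hfm
          rw [show get_sign_index_go ("-" :: t) i (-1)
                = get_sign_index_go t (i + 1) i from by
              simp [get_sign_index_go]]
          rw [ih (i + 1) i (by omega)]
          rw [PySem.List.index?_cons_self]
          rcases h : PySem.List.index? t "+" with _ | k
          · simp
            intro hcon; omega
          · simp; ring
        · rw [show get_sign_index_go ("-" :: t) i fm
                = get_sign_index_go t (i + 1) fm from by
              simp [get_sign_index_go, hfm]]
          rw [ih (i + 1) fm (by omega)]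
          rcases h : PySem.List.index? t "+" with _ | k
          · simp [hfm]
          · simp; ring
      · rw [show get_sign_index_go (w :: t) i fm
              = get_sign_index_go t (i + 1) fm from by
            simp [get_sign_index_go, hp, hm]]
        rw [ih (i + 1) fm (by omega)]
        rw [PySem.List.index?_cons_of_ne t hm]
        rcases h : PySem.List.index? t "+" with _ | k
        · simp only [Option.map_none]
          by_cases hfm : fm = -1
          · simp only [hfm, if_true]
            rcases h2 : PySem.List.index? t "-" with _ | k2
            · rfl
            · simp only [Option.map_some]
              push_cast; ring
          · simp [hfm]
        · simp only [Option.map_some]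
          push_cast; ring

-- ===== VERDICT (by name: the statement is the Claim_ definition above) =====
theorem get_sign_index_spec : Claim_equal_get_sign_index := by
  intro words _
  unfold Spec_get_sign_index get_sign_index get_sign_index_alt
  rw [get_sign_index_go_char words 0 (-1) (by omega)]
  rcases h : PySem.List.index? words "+" with _ | k
  · rcases h2 : PySem.List.index? words "-" with _ | k2 <;> simp
  · simp
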